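-- pv_equiv track=rewrite | github.com/molssi-seamm/seamm | seamm/variables.py | filter_expression
-- ===== SOURCE A (Python) =====
-- def filter_expression(string):
--     """A variable or expression coming from the GUI uses '$'
--     to indicate a variable, optionally bracketing the variable
--     with braces, i.e. ${name}.
--
--     This method filters out the variable markers, respecting
--     quoted string, returning a string that can be eval'ed in
--     the Python interpreter.
--     """
--
--     result = ""
--     state = ""
--     for char in string:
--         if state == "in single quotes":
--             result += char
--             if char == "'":
--                 state = ""
--         elif state == "in double quotes":
--             result += char
--             if char == '"':
--                 state = ""
--         elif state == "protected":
--             result += char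
--             state = ""
--         elif state == "in variable name":
--             if char == "}":
--                 state = ""
--             elif char == "{":
--                 pass
--             else:
--                 result += char
--         else:
--             if char == "$":
--                 state = "in variable name"
--             elif char == "'":
--                 result += char
--                 state = "in single quotes"
--             elif char == '"':
--                 result += char
--                 state = "in double quotes"
--             elif char == "\\":
--                 state = "protected"
--             else:
--                 result += char
--
--     return result
-- ===== SOURCE B (Python) =====
-- def filter_expression(string):
--     """Chunk-based rewrite: an index loop that copies quoted segments and
--     variable names in whole slices via str.find, instead of A's per-char
--     state machine."""
--     out = []
--     i = 0
--     n = len(string)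
--     while i < n:
--         c = string[i]
--         if c == "\\":
--             if i + 1 < n:
--                 out.append(string[i + 1])
--             i += 2
--         elif c == "'" or c == '"':
--             j = string.find(c, i + 1)
--             if j == -1:
--                 out.append(string[i:])
--                 i = n
--             else:
--                 out.append(string[i:j + 1])
--                 i = j + 1
--         elif c == "$":
--             j = string.find("}", i + 1)
--             if j == -1:
--                 out.append(string[i + 1:].replace("{", ""))
--                 i = n
--             else:
--                 out.append(string[i + 1:j].replace("{", ""))
--                 i = j + 1
--         else:
--             out.append(c)
--             i += 1
--     return "".join(out)
-- ===== Notes on version B (the rewrite author's own statement) =====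
-- stated objective: alternative
-- what changed: Replaces A's per-character state machine (five string-valued states) with an index-based loop that, on a quote or a variable marker, locates the closing delimiter with str.find and copies/filters the whole segment in one chunk.
import Mathlib
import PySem

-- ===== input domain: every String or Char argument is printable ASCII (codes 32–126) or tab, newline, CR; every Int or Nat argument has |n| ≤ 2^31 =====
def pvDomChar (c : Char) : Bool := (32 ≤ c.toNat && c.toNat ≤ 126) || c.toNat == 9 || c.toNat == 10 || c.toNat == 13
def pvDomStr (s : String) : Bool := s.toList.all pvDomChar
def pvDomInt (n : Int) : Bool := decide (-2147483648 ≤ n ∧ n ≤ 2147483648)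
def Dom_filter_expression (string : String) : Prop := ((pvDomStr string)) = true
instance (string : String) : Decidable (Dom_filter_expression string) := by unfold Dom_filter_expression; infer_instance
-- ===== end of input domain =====

-- B replaces A's per-char state machine by an index loop that copies quoted
-- segments and variable names in whole chunks (objective: alternative).

-- ===== PORT A =====
-- A's for-loop over the characters with its string accumulator `result` and
-- string-valued `state`; the str accumulation is ported over List Char
-- (String.mk at the end), as PySem's String↔List Char bridge prescribes.
def feA_loop : List Char → List Char → String → List Char
  | [], result, _ => result
  | c :: rest, result, state =>
    if state = "in single quotes" then
      feA_loop rest (result ++ [c]) (if c = '\'' then "" else state)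
    else if state = "in double quotes" then
      feA_loop rest (result ++ [c]) (if c = '"' then "" else state)
    else if state = "protected" then
      feA_loop rest (result ++ [c]) ""
    else if state = "in variable name" then
      if c = '}' then feA_loop rest result ""
      else if c = '{' then feA_loop rest result state
      else feA_loop rest (result ++ [c]) state
    else
      if c = '$' then feA_loop rest result "in variable name"
      else if c = '\'' then feA_loop rest (result ++ [c]) "in single quotes"
      else if c = '"' then feA_loop rest (result ++ [c]) "in double quotes"
      else if c = '\\' then feA_loop rest result "protected"
      else feA_loop rest (result ++ [c]) state

def filter_expression (string : String) : String :=
  String.mk (feA_loop string.toList [] "")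

-- ===== PORT B =====
-- B's index-based while loop, ported as recursion on the remaining characters:
-- `string.find(c, i+1)` and the slice up to it become takeWhile/dropWhile of
-- the remainder, `.replace("{", "")` becomes filter, `''.join` the appends.
def feB_go : List Char → List Char
  | [] => []
  | c :: rest =>
    if c = '\\' then
      match rest with
      | [] => []
      | d :: rest' => d :: feB_go rest'
    else if c = '\'' ∨ c = '"' then
      let post := rest.dropWhile (· != c)
      if h : post = [] then c :: rest.takeWhile (· != c)
      else (c :: rest.takeWhile (· != c) ++ [c]) ++ feB_go post.tail
    else if c = '$' then
      let post := rest.dropWhile (· != '}')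
      let body := (rest.takeWhile (· != '}')).filter (· != '{')
      if h : post = [] then body
      else body ++ feB_go post.tail
    else c :: feB_go rest
  termination_by cs => cs.length
  decreasing_by
    · simp
    · cases hp : rest.dropWhile (· != c) with
      | nil => exact absurd hp h
      | cons a as =>
        have h1 := List.length_dropWhile_le (· != c) rest
        rw [hp] at h1
        simp at h1 ⊢
        omega
    · cases hp : rest.dropWhile (· != '}') with
      | nil => exact absurd hp h
      | cons a as =>
        have h1 := List.length_dropWhile_le (· != '}') rest
        rw [hp] at h1
        simp at h1 ⊢
        omega
    · simp

def filter_expression_alt (string : String) : String :=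
  String.mk (feB_go string.toList)

-- ===== PRECONDITION & SPEC =====
def Spec_filter_expression (string : String) (out : String) : Prop := out = filter_expression_alt string
instance (string : String) (out : String) : Decidable (Spec_filter_expression string out) := by unfold Spec_filter_expression; infer_instance

-- ===== CLAIM (what is proved, stated in full; the proofs are below) =====
def Claim_equal_filter_expression : Prop := ∀ (string : String), Dom_filter_expression string → Spec_filter_expression string (filter_expression string)

-- ===== LEMMAS AND PROOFS =====

-- In the single-quote state, A copies chars up to the matching quote, then returns to "".
theorem feA_sq : ∀ (cs res : List Char),
    feA_loop cs res "in single quotes" =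
      (match cs.dropWhile (· != '\'') with
       | [] => res ++ cs.takeWhile (· != '\'')
       | _ :: rest' => feA_loop rest' (res ++ cs.takeWhile (· != '\'') ++ ['\'']) "") := by
  intro cs
  induction cs with
  | nil => intro res; simp [feA_loop]
  | cons c rest ih =>
    intro res
    by_cases hc : c = '\''
    · subst hc; simp [feA_loop, List.dropWhile, List.takeWhile]
    · rw [show feA_loop (c :: rest) res "in single quotes"
            = feA_loop rest (res ++ [c]) "in single quotes" by simp [feA_loop, hc]]
      rw [ih (res ++ [c])]
      have hbc : (c != '\'') = true := by simp [hc]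
      cases hdw : rest.dropWhile (· != '\'') <;>
        simp [List.dropWhile, List.takeWhile, hbc, hdw]

-- In the double-quote state, A copies chars up to the matching quote, then returns to "".
theorem feA_dq : ∀ (cs res : List Char),
    feA_loop cs res "in double quotes" =
      (match cs.dropWhile (· != '"') with
       | [] => res ++ cs.takeWhile (· != '"')
       | _ :: rest' => feA_loop rest' (res ++ cs.takeWhile (· != '"') ++ ['"']) "") := by
  intro cs
  induction cs with
  | nil => intro res; simp [feA_loop]
  | cons c rest ih =>
    intro res
    by_cases hc : c = '"'
    · subst hc; simp [feA_loop, List.dropWhile, List.takeWhile]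
    · rw [show feA_loop (c :: rest) res "in double quotes"
            = feA_loop rest (res ++ [c]) "in double quotes" by simp [feA_loop, hc]]
      rw [ih (res ++ [c])]
      have hbc : (c != '"') = true := by simp [hc]
      cases hdw : rest.dropWhile (· != '"') <;>
        simp [List.dropWhile, List.takeWhile, hbc, hdw]

-- In the variable-name state, A copies chars until '}' dropping '{', then "".
theorem feA_var : ∀ (cs res : List Char),
    feA_loop cs res "in variable name" =
      (match cs.dropWhile (· != '}') with
       | [] => res ++ (cs.takeWhile (· != '}')).filter (· != '{')
       | _ :: rest' => feA_loop rest' (res ++ (cs.takeWhile (· != '}')).filter (· != '{')) "") := by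
  intro cs
  induction cs with
  | nil => intro res; simp [feA_loop]
  | cons c rest ih =>
    intro res
    by_cases hc : c = '}'
    · subst hc; simp [feA_loop, List.dropWhile, List.takeWhile]
    · by_cases hb : c = '{'
      · subst hb
        rw [show feA_loop ('{' :: rest) res "in variable name"
              = feA_loop rest res "in variable name" by simp [feA_loop]]
        rw [ih res]
        cases hdw : rest.dropWhile (· != '}') <;>
          simp [List.dropWhile, List.takeWhile, hdw]
      · rw [show feA_loop (c :: rest) res "in variable name"
              = feA_loop rest (res ++ [c]) "in variable name" by simp [feA_loop, hc, hb]]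
        rw [ih (res ++ [c])]
        have hbc : (c != '}') = true := by simp [hc]
        have hbb : (c != '{') = true := by simp [hb]
        cases hdw : rest.dropWhile (· != '}') <;>
          simp [List.dropWhile, List.takeWhile, hbc, hbb, hdw]

theorem feA_eq_feB_aux : ∀ (n : Nat) (cs : List Char), cs.length ≤ n →
    ∀ (res : List Char), feA_loop cs res "" = res ++ feB_go cs := by
  intro n
  induction n with
  | zero =>
    intro cs hlen res
    have : cs = [] := by cases cs <;> simp_all
    subst this; simp [feA_loop, feB_go]
  | succ n ih =>
    intro cs hlen res
    match cs with
    | [] => unfold feB_go; simp [feA_loop]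
    | c :: rest =>
      have hr : rest.length ≤ n := by simp at hlen; omega
      by_cases hd : c = '$'
      · subst hd
        rw [show feA_loop ('$' :: rest) res "" = feA_loop rest res "in variable name" by
              simp [feA_loop]]
        rw [feA_var]
        cases hdw : rest.dropWhile (· != '}') with
        | nil => unfold feB_go; simp [hdw]
        | cons x rest' =>
          have hlt : rest'.length ≤ n := by
            have := List.length_dropWhile_le (· != '}') rest
            rw [hdw] at this; simp at this; omega
          unfold feB_go
          simp [hdw, ih rest' hlt, List.append_assoc]
      · by_cases hsq : c = '\''
        · subst hsq
          rw [show feA_loop ('\'' :: rest) res ""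
                = feA_loop rest (res ++ ['\'']) "in single quotes" by simp [feA_loop]]
          rw [feA_sq]
          cases hdw : rest.dropWhile (· != '\'') with
          | nil => unfold feB_go; simp [hdw]
          | cons x rest' =>
            have hlt : rest'.length ≤ n := by
              have := List.length_dropWhile_le (· != '\'') rest
              rw [hdw] at this; simp at this; omega
            unfold feB_go
            simp [hdw, ih rest' hlt, List.append_assoc]
        · by_cases hdq : c = '"'
          · subst hdq
            rw [show feA_loop ('"' :: rest) res ""
                  = feA_loop rest (res ++ ['"']) "in double quotes" by simp [feA_loop]]
            rw [feA_dq]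
            cases hdw : rest.dropWhile (· != '"') with
            | nil => unfold feB_go; simp [hdw]
            | cons x rest' =>
              have hlt : rest'.length ≤ n := by
                have := List.length_dropWhile_le (· != '"') rest
                rw [hdw] at this; simp at this; omega
              unfold feB_go
              simp [hdw, ih rest' hlt, List.append_assoc]
          · by_cases hbs : c = '\\'
            · subst hbs
              rw [show feA_loop ('\\' :: rest) res "" = feA_loop rest res "protected" by
                    simp [feA_loop]]
              cases rest with
              | nil => unfold feB_go; simp [feA_loop]
              | cons d rest' =>
                have hlt : rest'.length ≤ n := by simp at hr; omega
                rw [show feA_loop (d :: rest') res "protected"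
                      = feA_loop rest' (res ++ [d]) "" by simp [feA_loop]]
                unfold feB_go
                simp [ih rest' hlt]
            · rw [show feA_loop (c :: rest) res "" = feA_loop rest (res ++ [c]) "" by
                    simp [feA_loop, hd, hsq, hdq, hbs]]
              unfold feB_go
              simp [ih rest hr, hd, hsq, hdq, hbs]

theorem feA_eq_feB (cs res : List Char) : feA_loop cs res "" = res ++ feB_go cs :=
  feA_eq_feB_aux cs.length cs (Nat.le_refl _) res

-- ===== VERDICT (by name: the statement is the Claim_ definition above) =====
theorem filter_expression_spec : Claim_equal_filter_expression := by
  intro s _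
  unfold Spec_filter_expression filter_expression filter_expression_alt
  rw [feA_eq_feB, List.nil_append]
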